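/- GENERATED by farm/mkstatement.py from design/units.tsv (unit `start_decoder.F6b`) and the assertions of Vorbis/Spec/StartDecoderF6.lean — do not edit.
   THE STATEMENT of the proof unit `start_decoder.F6b`: segment F6b of `start_decoder` (25 instructions; entries 0x115768;
   exits 0x115768,0x11579e; ranges 0x11571b-0x115799)
   takes each of its entry assertions to one of its exit assertions (`Vorbis.Spec.StartDecoder.SegF6b`), given the contracts of its callees.
   What the names mean: Vorbis/Spec/Basic.lean (the shared hypotheses), Vorbis/Spec/StartDecoderF6.lean (the assertions). The theorem to prove:
   `theorem start_decoder_F6b_ok : Vorbis.Spec.start_decoder_F6b.Statement`. -/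
import Vorbis.Spec.Leaves2
import Vorbis.Spec.LibcSort
import Vorbis.Spec.StartDecoderF6
namespace Vorbis.Spec.start_decoder_F6b
open X86 X86.User Asan

/-- The statement of unit `start_decoder.F6b`. -/
def Statement : Prop :=
  ∀ (Lay : Layout) (_hLay : Lay.hi = 0x1000000) (μ : Microarch) (_hμ : UserX.MicroOK μ) (u₀ : State)
    (_hcode : HasCodeNat Lay u₀ Vorbis.L.start_decoder.entry Vorbis.Code.code_start_decoder.nat Vorbis.L.start_decoder.size)
    (_h_asan_load2_noabort : Asan.SmallCheck Lay μ Vorbis.WayInv (Vorbis.CodeOK u₀) [.rax, .rcx, .rdx] 2 Vorbis.L.__asan_load2_noabort.entry)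
    (_h_asan_store2_noabort : Asan.SmallCheck Lay μ Vorbis.WayInv (Vorbis.CodeOK u₀) [.rax, .rcx, .rdx] 2 Vorbis.L.__asan_store2_noabort.entry)
    (_h_asan_load4_noabort : Asan.SmallCheck Lay μ Vorbis.WayInv (Vorbis.CodeOK u₀) [.rax, .rcx, .rdx] 4 Vorbis.L.__asan_load4_noabort.entry)
    (_h_qsort : ∀ (others : List Obj) (frames : List (Nat × FrameLayout)) (cmp : Word) (w : Nat), Vorbis.Spec.CmpSpec Lay μ u₀ others frames cmp w → Calls Lay μ Vorbis.WayInv (Vorbis.conv u₀) Vorbis.L.qsort.entry (Vorbis.Spec.qsort.spec others frames cmp w))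
    (_h_point_compare : ∀ (others : List Obj) (frames : List (Nat × FrameLayout)), Calls Lay μ Vorbis.WayInv (Vorbis.conv u₀) Vorbis.L.point_compare.entry (Vorbis.Spec.point_compare.spec others frames)),
    Vorbis.Spec.StartDecoder.SegF6b Lay μ u₀

end Vorbis.Spec.start_decoder_F6b
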